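-- pv_equiv track=rewrite | github.com/burcam/AoC | 2023/7.py | get_hand_val
-- ===== SOURCE A (Python) =====
-- def get_hand_val(hand: str):
--     groups: dict[str, int] = {}
--     dupes = set('J')
--     for i in range(len(hand)-1):
--         if hand[i] in dupes:
--             continue
--         for j in range(i+1, len(hand)):
--             if hand[i] == hand[j]:
--                 a = groups.get(hand[i], 0)
--                 if a:
--                     groups[hand[i]] = a+1
--                 else:
--                     groups.setdefault(hand[i], 2)
--                 dupes.add(hand[i])
--     return groups
-- ===== SOURCE B (Python) =====
-- def get_hand_val(hand: str):
--     # one counting pass + ordered filter, instead of A's O(n^2) pairwise index scan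
--     counts: dict[str, int] = {}
--     for c in hand:
--         counts[c] = counts.get(c, 0) + 1
--     return {c: n for c, n in counts.items() if c != 'J' and n >= 2}
-- ===== Notes on version B (the rewrite author's own statement) =====
-- stated objective: faster
-- what changed: Replaced A's O(n^2) pairwise index scan with incremental dict/set bookkeeping by a single counting pass over the string followed by an ordered filter of the count table (first-occurrence order is preserved by the counts dict itself).
import Mathlib
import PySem

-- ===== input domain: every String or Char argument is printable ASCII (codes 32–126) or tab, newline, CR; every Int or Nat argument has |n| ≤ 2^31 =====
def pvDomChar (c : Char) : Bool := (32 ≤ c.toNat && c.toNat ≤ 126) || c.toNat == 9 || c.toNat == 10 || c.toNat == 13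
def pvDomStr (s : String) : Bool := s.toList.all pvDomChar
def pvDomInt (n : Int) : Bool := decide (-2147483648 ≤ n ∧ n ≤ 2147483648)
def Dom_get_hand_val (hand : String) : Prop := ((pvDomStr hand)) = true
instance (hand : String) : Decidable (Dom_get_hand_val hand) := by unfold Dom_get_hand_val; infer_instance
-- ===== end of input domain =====

-- B replaces A's O(n²) pairwise index scan by one counting pass plus an ordered filter
-- of the count table (return value only; neither program mutates its argument).

-- ===== PORT A =====
-- inner loop body of A: 'for j in range(i+1, len(hand)): …'
def pvInnerA (cs : List Char) (hi : String)
    (st2 : PySem.Dict String Int × PySem.Set String) (j : Int) :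
    PySem.Dict String Int × PySem.Set String :=
  let hj := String.singleton (PySem.List.pyGetD cs j ' ')
  if hi == hj then
    let a := st2.1.getD hi 0
    (if a ≠ 0 then st2.1.insert hi (a + 1) else st2.1.setdefault hi 2, st2.2.add hi)
  else st2

-- outer loop body of A: 'for i in range(len(hand)-1): …'
def pvOuterA (cs : List Char) (st : PySem.Dict String Int × PySem.Set String) (i : Int) :
    PySem.Dict String Int × PySem.Set String :=
  let hi := String.singleton (PySem.List.pyGetD cs i ' ')
  if st.2.contains hi then st
  else (PySem.List.pyRange (i + 1) (cs.length : Int)).foldl (pvInnerA cs hi) st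

def get_hand_val (hand : String) : List (String × Int) :=
  let cs := hand.toList
  ((PySem.List.pyRange 0 ((cs.length : Int) - 1)).foldl (pvOuterA cs)
      (PySem.Dict.mk [], PySem.Set.ofList [String.singleton 'J'])).1.items

-- ===== PORT B =====
def get_hand_val_alt (hand : String) : List (String × Int) :=
  let counts := hand.toList.foldl
    (fun (d : PySem.Dict String Int) c =>
      d.insert (String.singleton c) (d.getD (String.singleton c) 0 + 1))
    PySem.Dict.empty
  (counts.items.foldl
    (fun (d : PySem.Dict String Int) p =>
      if p.1 ≠ String.singleton 'J' ∧ 2 ≤ p.2 then d.insert p.1 p.2 else d)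
    PySem.Dict.empty).items

-- ===== PRECONDITION & SPEC =====
def Spec_get_hand_val (hand : String) (out : List (String × Int)) : Prop := out = get_hand_val_alt hand
instance (hand : String) (out : List (String × Int)) : Decidable (Spec_get_hand_val hand out) := by unfold Spec_get_hand_val; infer_instance

-- ===== CLAIM (what is proved, stated in full; the proofs are below) =====
def Claim_equal_get_hand_val : Prop := ∀ (hand : String), Dom_get_hand_val hand → Spec_get_hand_val hand (get_hand_val hand)

-- ===== LEMMAS AND PROOFS =====

-- the good characters: duplicated (count ≥ 2) and not 'J'
def pvGood (cs : List Char) (c : Char) : Bool := !(c == 'J') && decide (2 ≤ cs.count c)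

-- distinct good characters among the first k, in first-occurrence order
def pvGcs (cs : List Char) (k : Nat) : List Char :=
  (PySem.Set.ofList (cs.take k)).filter (pvGood cs)

-- A's loop state after the outer loop has handled the indices < k
def pvState (cs : List Char) (k : Nat) : PySem.Dict String Int × PySem.Set String :=
  (PySem.Dict.mk ((pvGcs cs k).map (fun c => (String.singleton c, (cs.count c : Int)))),
   String.singleton 'J' :: (pvGcs cs k).map String.singleton)

-- A's inner body, re-expressed on the character the index points at
def pvInnerC (hi : String) (st2 : PySem.Dict String Int × PySem.Set String) (x : Char) :
    PySem.Dict String Int × PySem.Set String :=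
  if hi == String.singleton x then
    let a := st2.1.getD hi 0
    (if a ≠ 0 then st2.1.insert hi (a + 1) else st2.1.setdefault hi 2, st2.2.add hi)
  else st2

theorem pvSingleton_inj {c x : Char} : String.singleton c = String.singleton x ↔ c = x := by
  simp [String.singleton]

theorem pvRange_natCast (a b : Nat) :
    PySem.List.pyRange (a : Int) (b : Int) = (List.range' a (b - a)).map (fun k : Nat => (k : Int)) := by
  rcases Nat.lt_or_ge a b with h | h
  case inr =>
    have h1 : b - a = 0 := by omega
    have h2 : ¬ ((a:Int) < (b:Int)) := by exact_mod_cast Nat.not_lt.mpr h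
    simp [PySem.List.pyRange, h1, h2]
  case inl =>
    have h2 : (a:Int) < (b:Int) := by exact_mod_cast h
    have h3 : (((b:Int) - a + 1 - 1) / 1).toNat = b - a := by omega
    have hr : (List.range' a (b-a)).map (fun k : Nat => (k:Int))
        = (List.range (b-a)).map (fun k : Nat => ((a+k : Nat) : Int)) := by
      rw [List.range'_eq_map_range, List.map_map]; rfl
    rw [hr]
    simp only [PySem.List.pyRange, if_pos h2, if_neg (one_ne_zero), if_pos Int.one_pos, h3]
    apply List.map_congr_left
    intro k _
    push_cast
    ring

theorem pvFold_range'_drop {σ : Type} (cs : List Char) (g : σ → Char → σ) :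
    ∀ (m a : Nat) (st : σ), a + m = cs.length →
      (List.range' a m).foldl (fun st j => g st (cs.getD j ' ')) st = (cs.drop a).foldl g st := by
  intro m
  induction m with
  | zero => intro a st h; simp [List.drop_of_length_le (by omega : cs.length ≤ a)]
  | succ m ih =>
    intro a st h
    have ha : a < cs.length := by omega
    rw [List.range'_succ, List.foldl_cons, ih (a+1) _ (by omega)]
    rw [List.drop_eq_getElem_cons ha, List.foldl_cons]
    congr 1
    simp [List.getD_eq_getElem?_getD, List.getElem?_eq_getElem ha]

theorem pvInner2 (c : Char) :
    ∀ (L : List Char) (g : PySem.Dict String Int) (s : PySem.Set String) (v : Int),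
      g.getD (String.singleton c) 0 = v → 0 < v → String.singleton c ∈ s →
      L.foldl (pvInnerC (String.singleton c)) (g, s) =
        ((if L.count c = 0 then g else g.insert (String.singleton c) (v + L.count c)), s) := by
  intro L
  induction L with
  | nil => intro g s v hv hvpos hs; simp
  | cons x L ih =>
    intro g s v hv hvpos hs
    by_cases hx : c = x
    · subst hx
      rw [List.foldl_cons]
      have hstep : pvInnerC (String.singleton c) (g, s) c
          = (g.insert (String.singleton c) (v + 1), s.add (String.singleton c)) := by
        simp [pvInnerC, hv]
        intro h0
        omega
      rw [hstep, PySem.Set.add_of_mem hs,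
        ih _ _ (v+1) (PySem.Dict.getD_insert_self g _ _ _) (by omega) hs]
      simp only [List.count_cons_self]
      rcases Nat.eq_zero_or_pos (L.count c) with h0 | h0
      · simp [h0]
      · rw [if_neg (by omega), if_neg (by omega), PySem.Dict.insert_insert_self]
        congr 2
        push_cast
        ring
    · rw [List.foldl_cons]
      have hstep : pvInnerC (String.singleton c) (g, s) x = (g, s) := by
        simp [pvInnerC, pvSingleton_inj, hx]
      rw [hstep, ih _ _ v hv hvpos hs, List.count_cons_of_ne (Ne.symm hx)]


theorem pvInner1 (c : Char) :
    ∀ (L : List Char) (g : PySem.Dict String Int) (s : PySem.Set String),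
      g.contains (String.singleton c) = false →
      L.foldl (pvInnerC (String.singleton c)) (g, s) =
        (if L.count c = 0 then (g, s)
         else (g.insert (String.singleton c) (1 + L.count c), s.add (String.singleton c))) := by
  intro L
  induction L with
  | nil => intro g s hg; simp
  | cons x L ih =>
    intro g s hg
    by_cases hx : c = x
    · subst hx
      rw [List.foldl_cons]
      have hstep : pvInnerC (String.singleton c) (g, s) c
          = (g.insert (String.singleton c) 2, s.add (String.singleton c)) := by
        simp [pvInnerC, PySem.Dict.getD_of_not_contains g _ hg,
          PySem.Dict.setdefault_of_not_contains g _ hg]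
      rw [hstep, pvInner2 c L _ _ 2 (PySem.Dict.getD_insert_self g _ _ _) (by omega)
        ((PySem.Set.mem_add s _ _).mpr (Or.inr rfl))]
      simp only [List.count_cons_self, if_neg (by omega : ¬ L.count c + 1 = 0)]
      rcases Nat.eq_zero_or_pos (L.count c) with h0 | h0
      · simp [h0]
      · rw [if_neg (by omega), PySem.Dict.insert_insert_self]
        congr 2
        push_cast
        ring
    · rw [List.foldl_cons]
      have hstep : pvInnerC (String.singleton c) (g, s) x = (g, s) := by
        simp [pvInnerC, pvSingleton_inj, hx]
      rw [hstep, ih _ _ hg, List.count_cons_of_ne (Ne.symm hx)]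

theorem pvStep (cs : List Char) (k : Nat) (hk : k < cs.length) :
    pvOuterA cs (pvState cs k) (k : Int) = pvState cs (k + 1) := by
  have hget : PySem.List.pyGetD cs (k : Int) ' ' = cs[k] := by
    rw [PySem.List.pyGetD_natCast]
    simp [List.getD_eq_getElem?_getD, List.getElem?_eq_getElem hk]
  have htake : cs.take (k+1) = cs.take k ++ [cs[k]] := by
    rw [List.take_succ, List.getElem?_eq_getElem hk]; rfl
  have hofl : PySem.Set.ofList (cs.take (k+1)) = (PySem.Set.ofList (cs.take k)).add cs[k] := by
    rw [htake, PySem.Set.ofList_append_singleton]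
  by_cases hmem : cs[k] = 'J' ∨ cs[k] ∈ pvGcs cs k
  · -- skipped: state unchanged, and the set of good chars does not change either
    have hcont : (pvState cs k).2.contains (String.singleton cs[k]) = true := by
      rw [PySem.Set.contains_eq_decide]
      apply decide_eq_true
      show String.singleton cs[k] ∈ String.singleton 'J' :: (pvGcs cs k).map String.singleton
      rcases hmem with h | h
      · rw [h]; exact List.mem_cons_self
      · exact List.mem_cons_of_mem _ (List.mem_map_of_mem h)
    have hgcs : pvGcs cs (k+1) = pvGcs cs k := by
      unfold pvGcs
      rw [hofl]
      by_cases hin : cs[k] ∈ PySem.Set.ofList (cs.take k)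
      · rw [PySem.Set.add_of_mem hin]
      · rw [PySem.Set.add_of_not_mem hin, List.filter_append]
        have hJ : cs[k] = 'J' := by
          rcases hmem with h | h
          · exact h
          · exact absurd ((List.mem_filter.mp h).1) hin
        simp [pvGood, hJ]
    simp only [pvOuterA, hget, hcont, if_pos]
    rw [show pvState cs (k+1) = pvState cs k by unfold pvState; rw [hgcs]]
  · push_neg at hmem
    obtain ⟨hcJ, hcg⟩ := hmem
    have hcont : (pvState cs k).2.contains (String.singleton cs[k]) = false := by
      rw [PySem.Set.contains_eq_decide]
      simp only [pvState, List.mem_cons, decide_eq_false_iff_not, not_or]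
      refine ⟨fun h => hcJ (pvSingleton_inj.mp h), fun h => ?_⟩
      rcases List.mem_map.mp h with ⟨y, hy, hxy⟩
      exact hcg (by rwa [pvSingleton_inj.mp hxy] at hy)
    have hnotin : cs[k] ∉ cs.take k := by
      intro hin
      apply hcg
      apply List.mem_filter.mpr
      refine ⟨(PySem.Set.mem_ofList _ _).mpr hin, ?_⟩
      have h1 : 1 ≤ (cs.take k).count cs[k] := List.count_pos_iff.mpr hin
      have h2 : 1 ≤ (cs.drop k).count cs[k] := by
        refine List.count_pos_iff.mpr ?_
        rw [List.drop_eq_getElem_cons hk]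
        exact List.mem_cons_self
      have h3 : 2 ≤ cs.count cs[k] := by
        have h4 : (cs.take k).count cs[k] + (cs.drop k).count cs[k] = cs.count cs[k] := by
          rw [← List.count_append, List.take_append_drop]
        omega
      simp [pvGood, hcJ, h3]
    have hcnt : cs.count cs[k] = (cs.drop (k+1)).count cs[k] + 1 := by
      have h4 : (cs.take (k+1)).count cs[k] + (cs.drop (k+1)).count cs[k] = cs.count cs[k] := by
        rw [← List.count_append, List.take_append_drop]
      rw [htake, List.count_append] at h4
      simp [List.count_eq_zero.mpr hnotin] at h4
      omega
    have hdfresh : (pvState cs k).1.contains (String.singleton cs[k]) = false := by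
      rw [PySem.Dict.contains_eq_decide_mem_keys, PySem.Dict.keys_mk]
      apply decide_eq_false
      intro h
      simp only [pvState] at h
      rw [List.map_map] at h
      rcases List.mem_map.mp h with ⟨y, hy, hxy⟩
      simp only [Function.comp_apply] at hxy
      exact hcg (by rwa [pvSingleton_inj.mp hxy] at hy)
    -- the inner loop
    have hfold : (PySem.List.pyRange ((k:Int) + 1) (cs.length : Int)).foldl
        (pvInnerA cs (String.singleton cs[k])) (pvState cs k)
        = (cs.drop (k+1)).foldl (pvInnerC (String.singleton cs[k])) (pvState cs k) := by
      have h1 : ((k:Int) + 1) = ((k+1 : Nat) : Int) := by push_cast; ring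
      rw [h1, pvRange_natCast, List.foldl_map]
      have h2 : (fun (st : PySem.Dict String Int × PySem.Set String) (j : Nat) =>
            pvInnerA cs (String.singleton cs[k]) st (j : Int))
          = (fun st j => pvInnerC (String.singleton cs[k]) st (cs.getD j ' ')) := by
        funext st j
        simp only [pvInnerA, pvInnerC, PySem.List.pyGetD_natCast]
      rw [h2, pvFold_range'_drop cs _ _ _ _ (by omega)]
    simp only [pvOuterA, hget, hcont, Bool.false_eq_true, if_false, hfold]
    rw [show pvState cs k = ((pvState cs k).1, (pvState cs k).2) from rfl,
      pvInner1 cs[k] _ _ _ hdfresh]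
    have hofl2 : PySem.Set.ofList (cs.take (k+1))
        = PySem.Set.ofList (cs.take k) ++ [cs[k]] := by
      rw [hofl, PySem.Set.add_of_not_mem (fun h => hnotin ((PySem.Set.mem_ofList _ _).mp h))]
    rcases Nat.eq_zero_or_pos ((cs.drop (k+1)).count cs[k]) with h0 | h0
    · rw [if_pos h0]
      have hgood : pvGood cs cs[k] = false := by
        simp [pvGood, hcJ]
        omega
      have hgcs : pvGcs cs (k+1) = pvGcs cs k := by
        unfold pvGcs
        rw [hofl2, List.filter_append]
        simp [hgood]
      rw [show pvState cs (k+1) = pvState cs k by unfold pvState; rw [hgcs]]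
    · rw [if_neg (by omega)]
      have hgood : pvGood cs cs[k] = true := by
        simp [pvGood, hcJ]
        omega
      have hgcs : pvGcs cs (k+1) = pvGcs cs k ++ [cs[k]] := by
        unfold pvGcs
        rw [hofl2, List.filter_append]
        simp [hgood]
      have hsnotin : String.singleton cs[k] ∉ (pvState cs k).2 := by
        intro h
        rcases List.mem_cons.mp h with h | h
        · exact hcJ (pvSingleton_inj.mp h)
        · rcases List.mem_map.mp h with ⟨y, hy, hxy⟩
          exact hcg (by rwa [pvSingleton_inj.mp hxy] at hy)
      refine Prod.ext ?_ ?_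
      · apply PySem.Dict.ext
        rw [PySem.Dict.items_insert_of_not_contains _ _ hdfresh]
        show _ ++ _ = ((pvGcs cs (k+1)).map (fun c => (String.singleton c, (cs.count c : Int))))
        rw [hgcs, List.map_append, List.map_singleton]
        congr 3
        rw [hcnt]
        push_cast
        ring
      · rw [PySem.Set.add_of_not_mem hsnotin]
        show _ ++ _ = String.singleton 'J' :: (pvGcs cs (k+1)).map String.singleton
        rw [hgcs, List.map_append, List.map_singleton]
        rfl


theorem pvOuterFold (cs : List Char) :
    ∀ (m a : Nat), a + m ≤ cs.length →
      (List.range' a m).foldl (fun st (j : Nat) => pvOuterA cs st (j : Int)) (pvState cs a) = pvState cs (a + m) := by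
  intro m
  induction m with
  | zero => intro a _; simp
  | succ m ih =>
    intro a h
    rw [List.range'_succ, List.foldl_cons, pvStep cs a (by omega), ih (a+1) (by omega)]
    congr 1
    omega

theorem pvGcs_last (cs : List Char) (h : 0 < cs.length) :
    pvGcs cs (cs.length - 1) = pvGcs cs cs.length := by
  have hk : cs.length - 1 < cs.length := by omega
  have htake : cs.take cs.length = cs.take (cs.length - 1) ++ [cs[cs.length - 1]] := by
    have h1 : cs.length = (cs.length - 1) + 1 := by omega
    conv_lhs => rw [h1]
    rw [List.take_succ, List.getElem?_eq_getElem hk]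
    rfl
  unfold pvGcs
  rw [htake, PySem.Set.ofList_append_singleton]
  by_cases hin : cs[cs.length - 1] ∈ PySem.Set.ofList (cs.take (cs.length - 1))
  · rw [PySem.Set.add_of_mem hin]
  · rw [PySem.Set.add_of_not_mem hin, List.filter_append]
    have hnotin : cs[cs.length - 1] ∉ cs.take (cs.length - 1) :=
      fun hmem => hin ((PySem.Set.mem_ofList _ _).mpr hmem)
    have hdrop : cs.drop (cs.length - 1) = [cs[cs.length - 1]] := by
      rw [List.drop_eq_getElem_cons hk, List.drop_of_length_le (by omega)]
    have hcnt : cs.count cs[cs.length - 1] = 1 := by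
      have h4 : (cs.take (cs.length - 1)).count cs[cs.length - 1]
          + (cs.drop (cs.length - 1)).count cs[cs.length - 1] = cs.count cs[cs.length - 1] := by
        rw [← List.count_append, List.take_append_drop]
      rw [List.count_eq_zero.mpr hnotin, hdrop] at h4
      simp at h4
      omega
    have hgood : pvGood cs cs[cs.length - 1] = false := by
      simp [pvGood]
      omega
    simp [hgood]

theorem pvA_eq (hand : String) :
    get_hand_val hand =
      ((PySem.Set.ofList hand.toList).filter (pvGood hand.toList)).map
        (fun c => (String.singleton c, (hand.toList.count c : Int))) := by
  rw [show get_hand_val hand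
      = ((PySem.List.pyRange 0 ((hand.toList.length : Int) - 1)).foldl (pvOuterA hand.toList)
          (PySem.Dict.mk [], PySem.Set.ofList [String.singleton 'J'])).1.items from rfl]
  set cs := hand.toList with hcs
  rcases Nat.eq_zero_or_pos cs.length with h0 | h0
  · have hnil : cs = [] := List.eq_nil_of_length_eq_zero h0
    rw [hnil]
    simp [PySem.List.pyRange, PySem.Set.ofList_nil]
  · have hinit : (PySem.Dict.mk ([] : List (String × Int)),
        PySem.Set.ofList [String.singleton 'J']) = pvState cs 0 := by
      unfold pvState pvGcs
      rw [List.take_zero, PySem.Set.ofList_nil]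
      rfl
    have h1 : ((cs.length : Int) - 1) = ((cs.length - 1 : Nat) : Int) := by omega
    have h2 : ((0 : Nat) : Int) = (0 : Int) := rfl
    rw [h1, ← h2, pvRange_natCast 0 (cs.length - 1), List.foldl_map, hinit, Nat.sub_zero,
      pvOuterFold cs (cs.length - 1) 0 (by omega)]
    rw [Nat.zero_add]
    simp only [pvState]
    rw [pvGcs_last cs h0]
    unfold pvGcs
    rw [List.take_length]

theorem pvOfList_map_singleton (cs : List Char) :
    PySem.Set.ofList (cs.map String.singleton) = (PySem.Set.ofList cs).map String.singleton := by
  induction cs using List.reverseRecOn with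
  | nil => simp [PySem.Set.ofList_nil]
  | append_singleton cs c ih =>
    rw [List.map_append, List.map_singleton, PySem.Set.ofList_append_singleton,
      PySem.Set.ofList_append_singleton, ih]
    by_cases hc : c ∈ PySem.Set.ofList cs
    · rw [PySem.Set.add_of_mem hc, PySem.Set.add_of_mem]
      exact List.mem_map_of_mem hc
    · rw [PySem.Set.add_of_not_mem hc, PySem.Set.add_of_not_mem, List.map_append,
        List.map_singleton]
      intro h
      rcases List.mem_map.mp h with ⟨y, hy, hxy⟩
      exact hc (by rwa [pvSingleton_inj.mp hxy] at hy)

theorem pvFilterFold :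
    ∀ (l : List (String × Int)) (d : PySem.Dict String Int),
      (∀ p ∈ l, d.contains p.1 = false) → (l.map Prod.fst).Nodup →
      (l.foldl (fun d p => if p.1 ≠ String.singleton 'J' ∧ 2 ≤ p.2 then d.insert p.1 p.2 else d) d).items
        = d.items ++ l.filter (fun p => decide (p.1 ≠ String.singleton 'J') && decide (2 ≤ p.2)) := by
  intro l
  induction l with
  | nil => intro d _ _; simp
  | cons p l ih =>
    intro d hfresh hnd
    rw [List.foldl_cons]
    have hndl : (l.map Prod.fst).Nodup := (List.nodup_cons.mp (by simpa using hnd)).2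
    have hp1 : p.1 ∉ l.map Prod.fst := (List.nodup_cons.mp (by simpa using hnd)).1
    by_cases hP : p.1 ≠ String.singleton 'J' ∧ 2 ≤ p.2
    · rw [if_pos hP, ih _ ?_ hndl]
      · rw [PySem.Dict.items_insert_of_not_contains d p.2 (hfresh p (by simp))]
        simp [hP]
      · intro q hq
        have : q.1 ≠ p.1 := by
          intro h
          exact hp1 (h ▸ List.mem_map_of_mem hq)
        simp [PySem.Dict.contains_insert, this, hfresh q (List.mem_cons_of_mem p hq)]
    · rw [if_neg hP, ih _ (fun q hq => hfresh q (List.mem_cons_of_mem p hq)) hndl]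
      simp only [List.filter_cons]
      rw [if_neg (by simpa using hP)]


theorem pvB_eq (hand : String) :
    get_hand_val_alt hand =
      ((PySem.Set.ofList hand.toList).filter (pvGood hand.toList)).map
        (fun c => (String.singleton c, (hand.toList.count c : Int))) := by
  unfold get_hand_val_alt
  set cs := hand.toList with hcs
  have hsing : Function.Injective String.singleton := fun a b h => pvSingleton_inj.mp h
  have hcounter : cs.foldl
      (fun (d : PySem.Dict String Int) c =>
        d.insert (String.singleton c) (d.getD (String.singleton c) 0 + 1)) PySem.Dict.empty
      = PySem.Dict.counter (cs.map String.singleton) := by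
    rw [← PySem.Dict.foldl_insert_getD_add_one_eq_counter, List.foldl_map]
  rw [hcounter, pvFilterFold _ _ ?_ ?_]
  · rw [PySem.Dict.items_counter, PySem.Dict.items]
    simp only [PySem.Dict.empty]
    rw [List.nil_append, List.filter_map, pvOfList_map_singleton, List.filter_map, List.map_map]
    rw [List.filter_congr (l := PySem.Set.ofList cs)
      (q := pvGood cs) ?_]
    · apply List.map_congr_left
      intro c hc
      simp only [Function.comp_apply]
      rw [List.count_map_of_injective cs String.singleton hsing c]
    · intro c hc
      simp only [Function.comp_apply, pvGood]
      rw [List.count_map_of_injective cs String.singleton hsing c]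
      have h1 : decide (String.singleton c ≠ String.singleton 'J') = !(c == 'J') := by
        by_cases h : c = 'J' <;> simp [h, pvSingleton_inj]
      have h2 : decide (2 ≤ (List.count c cs : Int)) = decide (2 ≤ List.count c cs) :=
        decide_eq_decide.mpr (by exact_mod_cast Iff.rfl)
      rw [h1, h2]
  · intro p hp
    exact PySem.Dict.contains_empty p.1
  · rw [PySem.Dict.items_counter]
    have : (List.map Prod.fst (List.map (fun k => (k, ((cs.map String.singleton).count k : Int)))
        (PySem.Set.ofList (cs.map String.singleton)))) = PySem.Set.ofList (cs.map String.singleton) := by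
      rw [List.map_map]
      exact List.map_id'' (fun k => rfl) _
    rw [this]
    exact PySem.Set.nodup_ofList _


-- ===== VERDICT (by name: the statement is the Claim_ definition above) =====
theorem get_hand_val_spec : Claim_equal_get_hand_val := by
  intro hand _
  unfold Spec_get_hand_val
  rw [pvA_eq, pvB_eq]
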